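-- pv_equiv track=rewrite | github.com/codeshuttler/CangjieTranslator | cjtrans/lang/syntax/cj_check.py | parse_error_messages
-- ===== SOURCE A (Python) =====
-- from typing import List, Tuple
--
-- def parse_error_messages(text: str) -> List[str]:
--     errors = []
--     current_error = None
--     for line in text.splitlines():
--         if line.startswith("error:") or line.startswith("note:") or line.startswith("warning:"):
--             if current_error is not None:
--                 errors.append(current_error)
--             current_error = ""
--             current_error += line + "\n"
--         else:
--             if current_error is not None:
--                 current_error += line + "\n"
--     if current_error is not None:
--         errors.append(current_error)
--     return errors
-- ===== SOURCE B (Python) =====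
-- def _is_header(line):
--     return line.startswith(("error:", "note:", "warning:"))
--
-- def parse_error_messages(text):
--     # Single reverse pass: body lines are stacked until the header above them
--     # is reached, which closes the group; preamble lines fall away naturally.
--     groups = []
--     tail = []  # body lines collected below the next header, in reverse order
--     for line in reversed(text.splitlines()):
--         if _is_header(line):
--             groups.append("".join(l + "\n" for l in [line] + tail[::-1]))
--             tail = []
--         else:
--             tail.append(line)
--     groups.reverse()
--     return groups
-- ===== Notes on version B (the rewrite author's own statement) =====
-- stated objective: alternative
-- what changed: A scans forward with an Optional running-string accumulator flushed at each header; B makes a single reverse pass that stacks body lines and emits a joined group when it meets the header above them, reversing the group list at the end (preamble lines are simply discarded, no None state).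
import Mathlib
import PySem

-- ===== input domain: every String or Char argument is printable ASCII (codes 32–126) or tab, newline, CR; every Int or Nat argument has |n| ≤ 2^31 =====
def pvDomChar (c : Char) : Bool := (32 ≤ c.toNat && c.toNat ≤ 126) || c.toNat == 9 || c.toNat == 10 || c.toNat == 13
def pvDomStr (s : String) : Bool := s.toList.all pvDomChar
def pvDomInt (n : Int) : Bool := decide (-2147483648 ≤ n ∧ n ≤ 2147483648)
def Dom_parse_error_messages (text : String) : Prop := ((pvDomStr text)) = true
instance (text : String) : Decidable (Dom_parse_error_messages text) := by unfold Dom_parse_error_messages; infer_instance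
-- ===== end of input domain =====

-- B replaces A's forward scan with an Optional string accumulator by a single reverse
-- pass that stacks body lines and closes a group at each header (objective: alternative).

-- header test shared by both programs (line.startswith of the three prefixes)
def pvIsHeader (line : String) : Bool :=
  PySem.Str.startswith line "error:" || PySem.Str.startswith line "note:" ||
    PySem.Str.startswith line "warning:"

-- ===== PORT A =====
-- loop body of A: state = (errors, current_error : Option String)
def pvStepA (st : List String × Option String) (line : String) :
    List String × Option String :=
  if pvIsHeader line then
    -- 'if current_error is not None: errors.append(current_error)' = append st.2.toList
    (st.1 ++ st.2.toList, some ("" ++ (line ++ "\n")))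
  else
    match st.2 with
    | some c => (st.1, some (c ++ (line ++ "\n")))
    | none => st

def parse_error_messages (text : String) : List String :=
  let r := (PySem.Str.splitlines text).foldl pvStepA ([], none)
  r.1 ++ r.2.toList

-- ===== PORT B =====
-- loop body of B: state = (groups, tail); tail[::-1] is ported as .reverse
-- (PySem.List.slice?_none_none_neg_one: the [::-1] slice is reversal)
def pvStepB (st : List String × List String) (line : String) :
    List String × List String :=
  if pvIsHeader line then
    (st.1 ++ [PySem.Str.join "" (([line] ++ st.2.reverse).map (fun l => l ++ "\n"))], [])
  else
    (st.1, st.2 ++ [line])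

def parse_error_messages_alt (text : String) : List String :=
  let r := ((PySem.Str.splitlines text).reverse).foldl pvStepB ([], [])
  r.1.reverse

-- ===== PRECONDITION & SPEC =====
def Spec_parse_error_messages (text : String) (out : List String) : Prop := out = parse_error_messages_alt text
instance (text : String) (out : List String) : Decidable (Spec_parse_error_messages text out) := by unfold Spec_parse_error_messages; infer_instance

-- ===== CLAIM (what is proved, stated in full; the proofs are below) =====
def Claim_equal_parse_error_messages : Prop := ∀ (text : String), Dom_parse_error_messages text → Spec_parse_error_messages text (parse_error_messages text)

-- ===== LEMMAS AND PROOFS =====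

-- the joined group string: every line followed by "\n"
def pvJ : List String → String
  | [] => ""
  | x :: xs => (x ++ "\n") ++ pvJ xs

-- canonical result: one group per header line, the group being the header plus
-- the longest run of non-header lines after it
def pvM : List String → List String
  | [] => []
  | l :: ls =>
    if pvIsHeader l then pvJ (l :: ls.takeWhile (fun x => !pvIsHeader x)) :: pvM ls
    else pvM ls

lemma pvJ_chars (xs : List String) :
    PySem.Chars.join [] ((xs.map (fun l => l ++ "\n")).map String.toList)
      = (pvJ xs).toList := by
  induction xs with
  | nil => simp [PySem.Chars.join_nil, pvJ]
  | cons x xs ih =>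
    cases xs with
    | nil => simp [PySem.Chars.join_singleton, pvJ, String.toList_append, String.append_empty]
    | cons y ys =>
      simp only [List.map_cons] at ih ⊢
      rw [PySem.Chars.join_cons_cons, ih]
      simp [pvJ, String.toList_append]

lemma pvJoin_eq (xs : List String) :
    PySem.Str.join "" (xs.map (fun l => l ++ "\n")) = pvJ xs := by
  apply String.toList_inj.mp
  rw [PySem.Str.toList_join]
  exact pvJ_chars xs

lemma pvA_some (ls : List String) (errs : List String) (c : String) :
    (ls.foldl pvStepA (errs, some c)).1 ++ (ls.foldl pvStepA (errs, some c)).2.toList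
      = errs ++ ((c ++ pvJ (ls.takeWhile (fun x => !pvIsHeader x))) :: pvM ls) := by
  induction ls generalizing errs c with
  | nil => simp [pvJ, pvM, String.append_empty]
  | cons l ls ih =>
    cases h : pvIsHeader l with
    | true =>
      simp only [List.foldl_cons, pvStepA, h, if_pos, Option.toList_some]
      rw [ih]
      simp [pvM, h, pvJ, String.append_empty, String.append_assoc]
    | false =>
      simp only [List.foldl_cons, pvStepA, h, Bool.false_eq_true, if_neg, not_false_iff]
      rw [ih]
      simp [pvM, h, pvJ, String.append_assoc]

lemma pvA_none (ls : List String) (errs : List String) :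
    (ls.foldl pvStepA (errs, none)).1 ++ (ls.foldl pvStepA (errs, none)).2.toList
      = errs ++ pvM ls := by
  induction ls generalizing errs with
  | nil => simp [pvM]
  | cons l ls ih =>
    cases h : pvIsHeader l with
    | true =>
      simp only [List.foldl_cons, pvStepA, h, if_pos, Option.toList_none, List.append_nil]
      rw [pvA_some ls errs ("" ++ (l ++ "\n"))]
      simp [pvM, h, pvJ, String.empty_append]
    | false =>
      simp only [List.foldl_cons, pvStepA, h, Bool.false_eq_true, if_neg, not_false_iff]
      rw [ih]
      simp [pvM, h]

lemma pvB_inv (ls : List String) :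
    ls.reverse.foldl pvStepB ([], [])
      = ((pvM ls).reverse, (ls.takeWhile (fun x => !pvIsHeader x)).reverse) := by
  induction ls with
  | nil => simp [pvM]
  | cons l ls ih =>
    rw [List.reverse_cons, List.foldl_append, ih]
    cases h : pvIsHeader l with
    | true =>
      simp [pvStepB, h, pvM]
      exact pvJoin_eq (l :: List.takeWhile (fun x => !pvIsHeader x) ls)
    | false => simp [pvStepB, h, pvM]

-- ===== VERDICT (by name: the statement is the Claim_ definition above) =====
theorem parse_error_messages_spec : Claim_equal_parse_error_messages := by
  intro text _
  unfold Spec_parse_error_messages parse_error_messages parse_error_messages_alt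
  rw [pvB_inv]
  simpa using pvA_none (PySem.Str.splitlines text) []
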